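-- pv_equiv track=rewrite | github.com/elektronka/PRI-sprawdzarka | sprawdzarka/upload/antyplagiat.py | get_textlist
-- ===== SOURCE A (Python) =====
-- def get_textlist(list_of_file1, list_of_file2):
--     text_list1 = []
--     text_list2 = []
--     appeared1 = False
--     appeared2 = False
--     for word1 in list_of_file1:
--         if word1 == '</sprawozdanie>':
--             appeared1 = True
--             continue
--         if appeared1 == True:
--             text_list1.append(word1)
--
--     for word2 in list_of_file2:
--         if word2 == '</sprawozdanie>':
--             appeared2 = True
--             continue
--         if appeared2 == True:
--             text_list2.append(word2)
--     del(list_of_file1)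
--     del(list_of_file2)
--
--     return text_list1, text_list2
-- ===== SOURCE B (Python) =====
-- def get_textlist(list_of_file1, list_of_file2):
--     MARKER = '</sprawozdanie>'
--
--     def after_marker(words):
--         if MARKER not in words:
--             return []
--         idx = words.index(MARKER)
--         return [w for w in words[idx + 1:] if w != MARKER]
--
--     return after_marker(list_of_file1), after_marker(list_of_file2)
-- ===== Notes on version B (the rewrite author's own statement) =====
-- stated objective: simpler
-- what changed: The two duplicated flag-based state-machine loops are replaced by one shared helper that locates the first marker with list.index, slices the tail, and filters out any later markers.
import Mathlib
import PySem

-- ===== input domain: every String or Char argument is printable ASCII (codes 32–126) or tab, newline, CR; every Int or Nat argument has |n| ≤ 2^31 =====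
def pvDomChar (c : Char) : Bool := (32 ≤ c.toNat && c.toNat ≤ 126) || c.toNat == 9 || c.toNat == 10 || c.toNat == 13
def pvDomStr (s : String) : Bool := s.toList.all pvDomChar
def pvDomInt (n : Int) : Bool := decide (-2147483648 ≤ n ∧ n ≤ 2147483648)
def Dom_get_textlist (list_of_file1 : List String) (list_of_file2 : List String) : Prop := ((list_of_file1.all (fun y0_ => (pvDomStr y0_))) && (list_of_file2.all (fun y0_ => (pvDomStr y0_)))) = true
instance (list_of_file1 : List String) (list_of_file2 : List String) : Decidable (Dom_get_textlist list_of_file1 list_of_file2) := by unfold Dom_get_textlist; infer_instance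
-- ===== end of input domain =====

-- B factors the two duplicated flag-based loops into one locate-then-filter helper (objective: simpler).
-- A's `del` of its parameters has no observable effect; the equivalence is about the return value.

-- ===== PORT A =====
-- one iteration of A's loop body: state = (appeared, text_list)
def pvStepA (st : Bool × List String) (w : String) : Bool × List String :=
  if w = "</sprawozdanie>" then (true, st.2)
  else if st.1 = true then (st.1, st.2 ++ [w]) else st

def get_textlist (list_of_file1 : List String) (list_of_file2 : List String) : List String × List String :=
  ((list_of_file1.foldl pvStepA (false, [])).2, (list_of_file2.foldl pvStepA (false, [])).2)

-- ===== PORT B =====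
-- helper after_marker: if the marker is absent return []; else slice past its first occurrence and drop later markers
def pvAfterMarker (words : List String) : List String :=
  match PySem.List.index? words "</sprawozdanie>" with
  | none => []
  | some idx => (PySem.List.slice words (some ((idx : Int) + 1)) none).filter
      (fun w => w ≠ "</sprawozdanie>")

def get_textlist_alt (list_of_file1 : List String) (list_of_file2 : List String) : List String × List String :=
  (pvAfterMarker list_of_file1, pvAfterMarker list_of_file2)

-- ===== PRECONDITION & SPEC =====
def Spec_get_textlist (list_of_file1 : List String) (list_of_file2 : List String) (out : List String × List String) : Prop := out = get_textlist_alt list_of_file1 list_of_file2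
instance (list_of_file1 : List String) (list_of_file2 : List String) (out : List String × List String) : Decidable (Spec_get_textlist list_of_file1 list_of_file2 out) := by unfold Spec_get_textlist; infer_instance

-- ===== CLAIM (what is proved, stated in full; the proofs are below) =====
def Claim_equal_get_textlist : Prop := ∀ (list_of_file1 : List String) (list_of_file2 : List String), Dom_get_textlist list_of_file1 list_of_file2 → Spec_get_textlist list_of_file1 list_of_file2 (get_textlist list_of_file1 list_of_file2)

-- ===== LEMMAS AND PROOFS =====

-- once the flag is set, A appends every non-marker word
theorem pvFoldA_true (ws : List String) : ∀ (acc : List String),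
    (ws.foldl pvStepA (true, acc)).2 = acc ++ ws.filter (fun w => w ≠ "</sprawozdanie>") := by
  induction ws with
  | nil => simp
  | cons w t ih =>
    intro acc
    by_cases hw : w = "</sprawozdanie>" <;>
      simp [pvStepA, hw, ih]

-- before the flag is set, A's loop computes B's helper
theorem pvAfterMarker_cons_self (t : List String) :
    pvAfterMarker ("</sprawozdanie>" :: t) = t.filter (fun w => w ≠ "</sprawozdanie>") := by
  unfold pvAfterMarker
  rw [PySem.List.index?_cons_self]
  simp [PySem.List.slice_from_one]

theorem pvAfterMarker_cons_of_ne (w : String) (t : List String) (hw : w ≠ "</sprawozdanie>") :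
    pvAfterMarker (w :: t) = pvAfterMarker t := by
  unfold pvAfterMarker
  rw [PySem.List.index?_cons_of_ne t hw]
  cases hidx : PySem.List.index? t "</sprawozdanie>" with
  | none => simp
  | some k =>
    simp only [Option.map_some]
    have h1 : ((k : Int) + 1) = ((k + 1 : Nat) : Int) := by push_cast; ring
    have h2 : ((((k + 1 : Nat) : Nat) : Int) + 1) = ((k + 2 : Nat) : Int) := by push_cast; ring
    rw [h1, h2, PySem.List.slice_from_natCast, PySem.List.slice_from_natCast]
    have h3 : (w :: t).drop (k + 2) = t.drop (k + 1) := by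
      rw [show k + 2 = (k + 1) + 1 from rfl, List.drop_succ_cons]
    rw [h3]

theorem pvFoldA_false (ws : List String) :
    (ws.foldl pvStepA (false, [])).2 = pvAfterMarker ws := by
  induction ws with
  | nil => simp [pvAfterMarker, PySem.List.index?]
  | cons w t ih =>
    by_cases hw : w = "</sprawozdanie>"
    · subst hw
      rw [List.foldl_cons]
      have hstep : pvStepA (false, []) "</sprawozdanie>" = (true, []) := by
        simp [pvStepA]
      rw [hstep, pvFoldA_true, pvAfterMarker_cons_self]
      simp
    · rw [List.foldl_cons]
      have hstep : pvStepA (false, []) w = (false, []) := by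
        simp [pvStepA, hw]
      rw [hstep, ih, pvAfterMarker_cons_of_ne w t hw]

-- ===== VERDICT (by name: the statement is the Claim_ definition above) =====
theorem get_textlist_spec : Claim_equal_get_textlist := by
  intro l1 l2 _
  unfold Spec_get_textlist get_textlist get_textlist_alt
  rw [pvFoldA_false, pvFoldA_false]
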